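-- pv_equiv track=rewrite | github.com/photonized/ITI1120 | Labs/lab4-students/prog_solved_v2.py | mess
-- ===== SOURCE A (Python) =====
-- def mess(phrase):
--      accum = ""
--      consonants = "rstvxyz"
--      for char in phrase:
--           if char in consonants:
--                accum = accum + char.upper()
--           elif char == " ":
--                accum = accum + "-"
--           else:
--                accum += char
--
--      return accum
-- ===== SOURCE B (Python) =====
-- _TABLE = str.maketrans({'r': 'R', 's': 'S', 't': 'T', 'v': 'V',
--                         'x': 'X', 'y': 'Y', 'z': 'Z', ' ': '-'})
--
-- def mess(phrase):
--     return phrase.translate(_TABLE)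
-- ===== Notes on version B (the rewrite author's own statement) =====
-- stated objective: idiomatic
-- what changed: Replaces the explicit accumulator loop with membership tests and repeated string concatenation by a precomputed str.maketrans table applied in a single phrase.translate call.
import Mathlib
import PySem

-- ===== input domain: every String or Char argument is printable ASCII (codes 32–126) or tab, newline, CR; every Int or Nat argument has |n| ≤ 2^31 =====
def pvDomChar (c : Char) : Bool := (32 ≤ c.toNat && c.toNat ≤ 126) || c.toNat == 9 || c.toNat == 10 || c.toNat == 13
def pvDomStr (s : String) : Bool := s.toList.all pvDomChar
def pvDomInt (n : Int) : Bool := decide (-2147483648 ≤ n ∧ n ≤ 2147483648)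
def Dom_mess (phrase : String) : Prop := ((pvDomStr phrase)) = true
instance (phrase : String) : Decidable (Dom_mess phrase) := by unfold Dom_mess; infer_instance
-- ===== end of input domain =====

-- B replaces A's accumulator loop (membership test + branches) by a per-character
-- translation-table lookup applied over the string (Python: str.maketrans + str.translate); idiomatic.


-- ===== PORT A =====
-- literal transliteration of A: fold over the characters with a string accumulator
def mess (phrase : String) : String :=
  phrase.toList.foldl (fun accum char =>
    if "rstvxyz".toList.contains char then accum ++ String.ofList [char.toUpper]
    else if char = ' ' then accum ++ "-"
    else accum ++ String.ofList [char]) ""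

-- ===== PORT B =====
-- the translation table built once (Python: str.maketrans dict literal)
def messTable : List (Char × Char) :=
  [('r','R'), ('s','S'), ('t','T'), ('v','V'), ('x','X'), ('y','Y'), ('z','Z'), (' ','-')]

-- str.translate: map each character through the table, identity on misses
def mess_alt (phrase : String) : String :=
  String.ofList (phrase.toList.map (fun c => (messTable.lookup c).getD c))

-- ===== PRECONDITION & SPEC =====
def Spec_mess (phrase : String) (out : String) : Prop := out = mess_alt phrase
instance (phrase : String) (out : String) : Decidable (Spec_mess phrase out) := by unfold Spec_mess; infer_instance

-- ===== CLAIM (what is proved, stated in full; the proofs are below) =====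
def Claim_equal_mess : Prop := ∀ (phrase : String), Dom_mess phrase → Spec_mess phrase (mess phrase)

-- ===== LEMMAS AND PROOFS =====
-- A's loop body produces, per character, exactly B's table translation
lemma mess_step (c : Char) :
    (if "rstvxyz".toList.contains c then String.ofList [c.toUpper]
     else if c = ' ' then "-" else String.ofList [c])
      = String.ofList [(messTable.lookup c).getD c] := by
  by_cases h : c ∈ (['r','s','t','v','x','y','z'] : List Char)
  · fin_cases h <;> decide
  · simp only [List.mem_cons, List.not_mem_nil, or_false, not_or] at h
    obtain ⟨hr, hs, ht, hv, hx, hy, hz⟩ := h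
    by_cases hsp : c = ' '
    · subst hsp; decide
    · have hl : "rstvxyz".toList = ['r','s','t','v','x','y','z'] := by decide
      have hc : ("rstvxyz".toList.contains c) = false := by
        rw [hl, List.contains_eq_mem]
        refine decide_eq_false ?_
        simp only [List.mem_cons, List.not_mem_nil, or_false, not_or]
        exact ⟨hr, hs, ht, hv, hx, hy, hz⟩
      rw [if_neg (by rw [hc]; exact Bool.false_ne_true), if_neg hsp]
      simp [messTable, List.lookup,
        beq_eq_false_iff_ne.mpr hr, beq_eq_false_iff_ne.mpr hs, beq_eq_false_iff_ne.mpr ht,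
        beq_eq_false_iff_ne.mpr hv, beq_eq_false_iff_ne.mpr hx, beq_eq_false_iff_ne.mpr hy,
        beq_eq_false_iff_ne.mpr hz, beq_eq_false_iff_ne.mpr hsp]

-- A's fold from any accumulator equals the accumulator followed by B's mapped tail
lemma mess_fold (l : List Char) (acc : String) :
    l.foldl (fun accum char =>
      if "rstvxyz".toList.contains char then accum ++ String.ofList [char.toUpper]
      else if char = ' ' then accum ++ "-"
      else accum ++ String.ofList [char]) acc
    = acc ++ String.ofList (l.map (fun c => (messTable.lookup c).getD c)) := by
  induction l generalizing acc with
  | nil => simp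
  | cons c cs ih =>
    have hstep :
        (if "rstvxyz".toList.contains c then acc ++ String.ofList [c.toUpper]
         else if c = ' ' then acc ++ "-"
         else acc ++ String.ofList [c])
          = acc ++ String.ofList [(messTable.lookup c).getD c] := by
      have h := mess_step c
      split_ifs at h ⊢ <;> rw [h]
    simp only [List.foldl_cons, List.map_cons, hstep, ih]
    rw [show ((messTable.lookup c).getD c :: cs.map (fun c => (messTable.lookup c).getD c))
          = [(messTable.lookup c).getD c] ++ cs.map (fun c => (messTable.lookup c).getD c) from rfl,
        String.ofList_append, String.append_assoc]

-- ===== VERDICT (by name: the statement is the Claim_ definition above) =====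
theorem mess_spec : Claim_equal_mess := by
  intro phrase _
  unfold Spec_mess mess mess_alt
  simpa using mess_fold phrase.toList ""
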